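-- pv_equiv track=rewrite | github.com/abdullahak07/MU-Align | attacks/usenix_pareto_distance.py | _parse_dataset_method
-- ===== SOURCE A (Python) =====
-- from typing import Dict, Tuple, List, Any, Optional
--
-- def _parse_dataset_method(left: str, methods: List[str]) -> Optional[Tuple[str, str]]:
--     """
--     Robust parsing for dataset names with underscores.
--     left = "{dataset}_{method}" where dataset may contain underscores.
--     """
--     for m in sorted(methods, key=len, reverse=True):
--         suf = "_" + m
--         if left.endswith(suf):
--             dataset = left[: -len(suf)]
--             method = m
--             if dataset:
--                 return dataset, method
--     return None
-- ===== SOURCE B (Python) =====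
-- from typing import List, Optional, Tuple
--
-- def _parse_dataset_method(left: str, methods: List[str]) -> Optional[Tuple[str, str]]:
--     # Single linear pass keeping the best (longest) valid suffix match; no sorting.
--     best = None
--     best_len = -1
--     for m in methods:
--         suf = "_" + m
--         if left.endswith(suf) and len(left) > len(suf) and len(m) > best_len:
--             best = (left[: -len(suf)], m)
--             best_len = len(m)
--     return best
-- ===== Notes on version B (the rewrite author's own statement) =====
-- stated objective: simpler
-- what changed: Replaces sort-by-length-descending followed by first-match with a single linear pass that keeps the longest valid suffix match seen so far; correct because a suffix of a given length is unique, so the longest valid match determines the result.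
import Mathlib
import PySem

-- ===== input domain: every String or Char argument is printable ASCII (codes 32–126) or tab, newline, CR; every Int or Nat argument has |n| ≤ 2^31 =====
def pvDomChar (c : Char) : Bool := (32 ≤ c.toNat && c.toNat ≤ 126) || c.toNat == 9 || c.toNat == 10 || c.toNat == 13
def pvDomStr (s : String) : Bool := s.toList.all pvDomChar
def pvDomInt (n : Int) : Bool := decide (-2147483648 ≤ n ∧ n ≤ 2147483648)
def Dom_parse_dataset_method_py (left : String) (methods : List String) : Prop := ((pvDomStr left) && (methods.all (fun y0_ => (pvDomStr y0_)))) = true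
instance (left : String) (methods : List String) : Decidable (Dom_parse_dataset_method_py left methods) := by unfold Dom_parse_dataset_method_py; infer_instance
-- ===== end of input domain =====

-- B replaces A's sort-by-length-descending + first-match with a single linear pass
-- keeping the longest valid suffix match; same return value, no sorting.

-- ===== PORT A =====
-- A's loop: first match over methods sorted by len descending (stable).
def pvLoopA (left : List Char) : List String → Option (String × String)
  | [] => none
  | m :: rest =>
      let suf := ['_'] ++ m.toList
      if PySem.Chars.endswith left suf then
        let dataset := PySem.List.slice left none (some (-(suf.length : Int)))
        if dataset ≠ [] then some (String.ofList dataset, m) else pvLoopA left rest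
      else pvLoopA left rest

def parse_dataset_method_py (left : String) (methods : List String) : Option (String × String) :=
  pvLoopA left.toList (PySem.List.sorted methods (fun m => PySem.Str.len m) true)

-- ===== PORT B =====
def parse_dataset_method_py_alt (left : String) (methods : List String) : Option (String × String) :=
  (methods.foldl (fun (acc : Option (String × String) × Int) m =>
      let suf := ['_'] ++ m.toList
      if PySem.Chars.endswith left.toList suf
          && decide ((PySem.Chars.len left.toList) > (PySem.Chars.len suf))
          && decide (((m.toList.length : Int)) > acc.2)
      then (some (String.ofList (PySem.List.slice left.toList none (some (-(suf.length : Int)))), m), (m.toList.length : Int))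
      else acc)
    ((none : Option (String × String)), (-1 : Int))).1

-- ===== PRECONDITION & SPEC =====
def Spec_parse_dataset_method_py (left : String) (methods : List String) (out : Option (String × String)) : Prop := out = parse_dataset_method_py_alt left methods
instance (left : String) (methods : List String) (out : Option (String × String)) : Decidable (Spec_parse_dataset_method_py left methods out) := by unfold Spec_parse_dataset_method_py; infer_instance

-- ===== CLAIM (what is proved, stated in full; the proofs are below) =====
def Claim_equal_parse_dataset_method_py : Prop := ∀ (left : String) (methods : List String), Dom_parse_dataset_method_py left methods → Spec_parse_dataset_method_py left methods (parse_dataset_method_py left methods)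

-- ===== LEMMAS AND PROOFS =====

-- "m is a valid match": '_' + m is a suffix of left and the dataset part is nonempty.
def pvP (left : List Char) (m : String) : Prop :=
  ('_' :: m.toList) <:+ left ∧ m.toList.length + 2 ≤ left.length

-- the returned pair for a valid match m
def pvOut (left : List Char) (m : String) : String × String :=
  (String.ofList (left.take (left.length - (m.toList.length + 1))), m)

-- two valid matches of equal length are the same string
lemma pvP_unique {left : List Char} {m1 m2 : String}
    (h1 : pvP left m1) (h2 : pvP left m2)
    (hlen : m1.toList.length = m2.toList.length) : m1 = m2 := by
  obtain ⟨⟨t1, e1⟩, -⟩ := h1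
  obtain ⟨⟨t2, e2⟩, -⟩ := h2
  rw [← e2] at e1
  have hl : ('_' :: m1.toList).length = ('_' :: m2.toList).length := by
    simp [hlen]
  obtain ⟨-, h⟩ := List.append_inj' e1 hl
  have : m1.toList = m2.toList := by simpa using h
  exact String.ext (by simpa [String.toList] using this)

lemma pvSlice_eq (left : List Char) (m : String) :
    PySem.List.slice left none (some (-((('_' :: m.toList).length : Nat) : Int)))
      = left.take (left.length - (m.toList.length + 1)) := by
  rw [PySem.List.slice_to_neg_natCast left ('_' :: m.toList).length (by simp)]
  simp

-- the two conditions of A's loop body decode to pvP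
lemma pvCond_iff (left : List Char) (m : String) :
    (PySem.Chars.endswith left ('_' :: m.toList) = true ∧
      PySem.List.slice left none (some (-((('_' :: m.toList).length : Nat) : Int))) ≠ [])
    ↔ pvP left m := by
  rw [PySem.Chars.endswith_iff, pvSlice_eq]
  constructor
  · rintro ⟨hs, hne⟩
    refine ⟨hs, ?_⟩
    have hle : ('_' :: m.toList).length ≤ left.length := hs.length_le
    simp only [List.length_cons] at hle
    rw [Ne, List.take_eq_nil_iff] at hne
    push_neg at hne
    obtain ⟨hne1, hne2⟩ := hne
    have hne3 : left.length ≠ 0 := by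
      intro h0; exact hne2 (List.eq_nil_of_length_eq_zero h0)
    omega
  · rintro ⟨hs, hlen⟩
    refine ⟨hs, ?_⟩
    rw [Ne, List.take_eq_nil_iff]
    push_neg
    refine ⟨by omega, ?_⟩
    rintro rfl; simp at hlen

-- characterisation of A's loop on a length-descending list
lemma pvLoopA_spec (left : List Char) (s : List String)
    (hs : s.Pairwise (fun a b => PySem.Str.len b ≤ PySem.Str.len a)) :
    (pvLoopA left s = none ∧ ∀ m ∈ s, ¬ pvP left m)
    ∨ (∃ m, m ∈ s ∧ pvP left m ∧ pvLoopA left s = some (pvOut left m) ∧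
        ∀ m' ∈ s, pvP left m' → m'.toList.length ≤ m.toList.length) := by
  induction s with
  | nil => left; exact ⟨rfl, by simp⟩
  | cons x t ih =>
      rcases List.pairwise_cons.mp hs with ⟨hx, ht⟩
      by_cases hpx : pvP left x
      · right
        refine ⟨x, List.mem_cons_self, hpx, ?_, ?_⟩
        · obtain ⟨he, hne⟩ := (pvCond_iff left x).mpr hpx
          rw [pvSlice_eq] at hne
          simp only [pvLoopA, List.cons_append, List.nil_append]
          rw [he]
          simp only [ite_true, ne_eq, ite_not, pvSlice_eq, pvOut]
          rw [if_neg hne]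
        · intro m' hm' _
          rcases List.mem_cons.mp hm' with rfl | hm'
          · exact le_refl _
          · have h1 := hx m' hm'
            simp only [PySem.Str.len_eq] at h1
            have h2 := String.length_toList (s := m')
            have h3 := String.length_toList (s := x)
            omega
      · have hcond := (not_iff_not.mpr (pvCond_iff left x)).mpr hpx
        have hrec : pvLoopA left (x :: t) = pvLoopA left t := by
          simp only [pvLoopA, List.cons_append, List.nil_append]
          by_cases he : PySem.Chars.endswith left ('_' :: x.toList) = true
          · have hnil : PySem.List.slice left none
                (some (-((('_' :: x.toList).length : Nat) : Int))) = [] := by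
              by_contra hne
              exact hcond ⟨he, hne⟩
            have hnil' : List.take (left.length - (x.toList.length + 1)) left = [] := by
              rw [← pvSlice_eq]; exact hnil
            rw [he]
            simp only [ite_true, ne_eq, ite_not]
            rw [pvSlice_eq, if_pos hnil']
          · rw [Bool.not_eq_true] at he
            rw [he]
            simp
        rw [hrec]
        rcases ih ht with ⟨h1, h2⟩ | ⟨m, hm, hpm, heq, hmax⟩
        · left
          refine ⟨h1, ?_⟩
          intro m hm
          rcases List.mem_cons.mp hm with rfl | hm
          · exact hpx
          · exact h2 m hm
        · right
          refine ⟨m, List.mem_cons_of_mem _ hm, hpm, heq, ?_⟩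
          intro m' hm' hpm'
          rcases List.mem_cons.mp hm' with rfl | hm'
          · exact absurd hpm' hpx
          · exact hmax m' hm' hpm'

-- the step function of B's fold
def pvStep (left : List Char) (acc : Option (String × String) × Int) (m : String) :
    Option (String × String) × Int :=
  if PySem.Chars.endswith left ('_' :: m.toList)
      && decide ((PySem.Chars.len left) > (PySem.Chars.len ('_' :: m.toList)))
      && decide (((m.toList.length : Int)) > acc.2)
  then (some (String.ofList (PySem.List.slice left none (some (-((('_' :: m.toList).length : Nat) : Int)))), m), (m.toList.length : Int))
  else acc

lemma pvStep_fires (left : List Char) (acc : Option (String × String) × Int) (m : String)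
    (h : pvP left m) (hgt : acc.2 < (m.toList.length : Int)) :
    pvStep left acc m = (some (pvOut left m), (m.toList.length : Int)) := by
  obtain ⟨hs, hlen⟩ := h
  have hc : (PySem.Chars.endswith left ('_' :: m.toList)
      && decide ((PySem.Chars.len left) > (PySem.Chars.len ('_' :: m.toList)))
      && decide (((m.toList.length : Int)) > acc.2)) = true := by
    simp only [Bool.and_eq_true, decide_eq_true_eq, PySem.Chars.len_eq]
    refine ⟨⟨(PySem.Chars.endswith_iff _ _).mpr hs, ?_⟩, hgt⟩
    simp only [List.length_cons, gt_iff_lt]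
    exact_mod_cast Nat.lt_of_lt_of_le (by omega) hlen
  unfold pvStep
  rw [if_pos hc, pvSlice_eq]
  rfl

lemma pvStep_skips (left : List Char) (acc : Option (String × String) × Int) (m : String)
    (h : ¬ (pvP left m ∧ acc.2 < (m.toList.length : Int))) :
    pvStep left acc m = acc := by
  unfold pvStep
  rw [if_neg]
  intro hcond
  simp only [Bool.and_eq_true, decide_eq_true_eq, PySem.Chars.len_eq] at hcond
  obtain ⟨⟨he, hl⟩, hgt⟩ := hcond
  simp only [List.length_cons, gt_iff_lt] at hl
  apply h
  have hl' : m.toList.length + 1 < left.length := by exact_mod_cast hl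
  refine ⟨⟨(PySem.Chars.endswith_iff _ _).mp he, by omega⟩, hgt⟩

-- characterisation of B's fold from any accumulator
lemma pvFoldB_spec (left : List Char) (l : List String)
    (acc : Option (String × String) × Int) :
    (l.foldl (pvStep left) acc = acc ∧ ∀ m ∈ l, pvP left m → (m.toList.length : Int) ≤ acc.2)
    ∨ (∃ m, m ∈ l ∧ pvP left m ∧
        l.foldl (pvStep left) acc = (some (pvOut left m), (m.toList.length : Int)) ∧
        acc.2 ≤ (m.toList.length : Int) ∧
        ∀ m' ∈ l, pvP left m' → m'.toList.length ≤ m.toList.length) := by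
  induction l generalizing acc with
  | nil => left; exact ⟨rfl, by simp⟩
  | cons x t ih =>
      by_cases hfire : pvP left x ∧ acc.2 < (x.toList.length : Int)
      · obtain ⟨hpx, hgt⟩ := hfire
        have hstep := pvStep_fires left acc x hpx hgt
        rw [List.foldl_cons, hstep]
        rcases ih (some (pvOut left x), (x.toList.length : Int)) with ⟨h1, h2⟩ | ⟨m, hm, hpm, heq, hge, hmax⟩
        · right
          refine ⟨x, List.mem_cons_self, hpx, h1, le_of_lt hgt, ?_⟩
          intro m' hm' hpm'
          rcases List.mem_cons.mp hm' with rfl | hm'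
          · exact le_refl _
          · have h3 : (m'.toList.length : Int) ≤ ((x.toList.length : Int)) := h2 m' hm' hpm'
            exact_mod_cast h3
        · right
          refine ⟨m, List.mem_cons_of_mem _ hm, hpm, heq, ?_, ?_⟩
          · have h3 : (x.toList.length : Int) ≤ ((m.toList.length : Int)) := hge
            omega
          · intro m' hm' hpm'
            rcases List.mem_cons.mp hm' with rfl | hm'
            · have h3 : (m'.toList.length : Int) ≤ ((m.toList.length : Int)) := hge
              exact_mod_cast h3
            · exact hmax m' hm' hpm'
      · have hstep := pvStep_skips left acc x hfire
        rw [List.foldl_cons, hstep]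
        push_neg at hfire
        rcases ih acc with ⟨h1, h2⟩ | ⟨m, hm, hpm, heq, hge, hmax⟩
        · left
          refine ⟨h1, ?_⟩
          intro m hm hpm
          rcases List.mem_cons.mp hm with rfl | hm
          · exact hfire hpm
          · exact h2 m hm hpm
        · right
          refine ⟨m, List.mem_cons_of_mem _ hm, hpm, heq, hge, ?_⟩
          intro m' hm' hpm'
          rcases List.mem_cons.mp hm' with rfl | hm'
          · have h3 := hfire hpm'
            omega
          · exact hmax m' hm' hpm'

lemma pvAltB_eq_fold (left : String) (methods : List String) :
    parse_dataset_method_py_alt left methods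
      = (methods.foldl (pvStep left.toList) (none, -1)).1 := by
  unfold parse_dataset_method_py_alt pvStep
  rfl

-- ===== VERDICT (by name: the statement is the Claim_ definition above) =====
theorem parse_dataset_method_py_spec : Claim_equal_parse_dataset_method_py := by
  intro left methods _
  unfold Spec_parse_dataset_method_py
  rw [pvAltB_eq_fold]
  unfold parse_dataset_method_py
  have hA := pvLoopA_spec left.toList
    (PySem.List.sorted methods (fun m => PySem.Str.len m) true)
    (PySem.List.sorted_pairwise_rev methods (fun m => PySem.Str.len m))
  have hB := pvFoldB_spec left.toList methods (none, -1)
  rcases hA with ⟨hAeq, hAnone⟩ | ⟨m, hm, hpm, hAeq, hAmax⟩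
  · rcases hB with ⟨hBeq, _⟩ | ⟨m, hm, hpm, hBeq, _, _⟩
    · rw [hAeq, hBeq]
    · exact absurd hpm (hAnone m ((PySem.List.mem_sorted methods _ true m).mpr hm))
  · rcases hB with ⟨_, hBnone⟩ | ⟨m', hm', hpm', hBeq, _, hBmax⟩
    · have := hBnone m ((PySem.List.mem_sorted methods _ true m).mp hm) hpm
      simp at this
      omega
    · rw [hAeq, hBeq]
      have h1 : m'.toList.length ≤ m.toList.length :=
        hAmax m' ((PySem.List.mem_sorted methods _ true m').mpr hm') hpm'
      have h2 : m.toList.length ≤ m'.toList.length :=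
        hBmax m ((PySem.List.mem_sorted methods _ true m).mp hm) hpm
      have heqm : m = m' := pvP_unique hpm hpm' (le_antisymm h2 h1)
      rw [heqm]
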